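-- pv_equiv track=rewrite | github.com/ClassIaC/hanam | app.py | build_comment_author_aliases
-- ===== SOURCE A (Python) =====
-- def build_comment_author_aliases(comments_rows):
--     """게시글 내 댓글 작성자별로 익명1, 익명2 … 번호를 안정적으로 부여 (첫 댓글 시각 순)."""
--     ordered = sorted(comments_rows, key=lambda r: r["created_at"])
--     aliases = {}
--     n = 0
--     for row in ordered:
--         aid = row["author_id"]
--         if aid not in aliases:
--             n += 1
--             aliases[aid] = n
--     return aliases
-- ===== SOURCE B (Python) =====
-- def build_comment_author_aliases(comments_rows):
--     """Per-author minimum (created_at, row_index) in one pass, then sort only the k distinct authors."""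
--     best = {}
--     for i, row in enumerate(comments_rows):
--         key = (row["created_at"], i)
--         aid = row["author_id"]
--         cur = best.get(aid)
--         if cur is None or key < cur:
--             best[aid] = key
--     aliases = {}
--     for n, (aid, _) in enumerate(sorted(best.items(), key=lambda kv: kv[1]), 1):
--         aliases[aid] = n
--     return aliases
-- ===== Notes on version B (the rewrite author's own statement) =====
-- stated objective: alternative
-- what changed: Instead of stably sorting all n rows and numbering authors at first occurrence, B makes one pass keeping each author's lexicographically smallest (created_at, row_index) key and then sorts only the k distinct authors by that key.
import Mathlib
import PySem

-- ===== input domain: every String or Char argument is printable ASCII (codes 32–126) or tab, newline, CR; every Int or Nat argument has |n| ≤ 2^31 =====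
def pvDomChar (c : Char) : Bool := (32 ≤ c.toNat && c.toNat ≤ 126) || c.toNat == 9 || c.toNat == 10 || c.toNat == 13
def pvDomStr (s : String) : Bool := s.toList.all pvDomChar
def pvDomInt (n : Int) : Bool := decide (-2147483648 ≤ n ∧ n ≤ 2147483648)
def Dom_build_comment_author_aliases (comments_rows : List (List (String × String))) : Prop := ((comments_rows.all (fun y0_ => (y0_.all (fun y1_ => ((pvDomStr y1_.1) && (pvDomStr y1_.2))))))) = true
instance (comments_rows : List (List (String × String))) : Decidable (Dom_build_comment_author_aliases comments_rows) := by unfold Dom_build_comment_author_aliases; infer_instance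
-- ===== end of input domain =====

-- B replaces A's full stable sort of all rows by a one-pass per-author minimum of the
-- (created_at, row_index) key followed by a sort of only the distinct authors (objective: alternative).

-- row[k] : Python dict subscript on an association-list row (first match).
def pvGetKey (row : List (String × String)) (k : String) : String :=
  (PySem.Dict.mk row).getD k ""

-- ===== PORT A =====
def build_comment_author_aliases (comments_rows : List (List (String × String))) : List (String × Int) :=
  ((PySem.List.sorted comments_rows (fun r => pvGetKey r "created_at") false).foldl
    (fun st row =>
      if st.1.contains (pvGetKey row "author_id") then st
      else (st.1.insert (pvGetKey row "author_id") (st.2 + 1), st.2 + 1))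
    ((PySem.Dict.empty : PySem.Dict String Int), (0 : Int))).1.items

-- ===== PORT B =====
def build_comment_author_aliases_alt (comments_rows : List (List (String × String))) : List (String × Int) :=
  ((PySem.List.enumerate
      (PySem.List.sorted2
        ((PySem.List.enumerate comments_rows 0).foldl
          (fun d p =>
            match d.get? (pvGetKey p.2 "author_id") with
            | none => d.insert (pvGetKey p.2 "author_id") (pvGetKey p.2 "created_at", p.1)
            | some cur =>
              if pvGetKey p.2 "created_at" < cur.1 ∨ (pvGetKey p.2 "created_at" = cur.1 ∧ p.1 < cur.2)
              then d.insert (pvGetKey p.2 "author_id") (pvGetKey p.2 "created_at", p.1)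
              else d)
          (PySem.Dict.empty : PySem.Dict String (String × Int))).items
        (fun kv => kv.2.1) (fun kv => kv.2.2) false)
      1).foldl
    (fun d q => d.insert q.2.1 q.1) (PySem.Dict.empty : PySem.Dict String Int)).items

-- ===== PRECONDITION & SPEC =====
-- Pre_ excludes exactly the rows missing a "created_at" or "author_id" key, on which Python A raises KeyError.
def Pre_build_comment_author_aliases (comments_rows : List (List (String × String))) : Prop :=
  ∀ row ∈ comments_rows, "created_at" ∈ row.map Prod.fst ∧ "author_id" ∈ row.map Prod.fst
instance (comments_rows : List (List (String × String))) : Decidable (Pre_build_comment_author_aliases comments_rows) := by unfold Pre_build_comment_author_aliases; infer_instance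

def pvWitness_build_comment_author_aliases : (List (List (String × String))) :=
  [[("created_at", "b"), ("author_id", "u")], [("created_at", "a"), ("author_id", "v")],
   [("created_at", "a"), ("author_id", "u")]]

def Spec_build_comment_author_aliases (comments_rows : List (List (String × String))) (out : List (String × Int)) : Prop := out = build_comment_author_aliases_alt comments_rows
instance (comments_rows : List (List (String × String))) (out : List (String × Int)) : Decidable (Spec_build_comment_author_aliases comments_rows out) := by unfold Spec_build_comment_author_aliases; infer_instance

-- ===== CLAIM (what is proved, stated in full; the proofs are below) =====
def Claim_equal_build_comment_author_aliases : Prop := ∀ (comments_rows : List (List (String × String))), Dom_build_comment_author_aliases comments_rows → Pre_build_comment_author_aliases comments_rows → Spec_build_comment_author_aliases comments_rows (build_comment_author_aliases comments_rows)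

-- ===== LEMMAS AND PROOFS =====

-- Lexicographic strict order on (created_at, index) keys, Python's tuple '<'.
abbrev ltK (u v : String × Int) : Prop := u.1 < v.1 ∨ (u.1 = v.1 ∧ u.2 < v.2)

lemma ltK_irrefl (u : String × Int) : ¬ ltK u u := by
  rintro (h | ⟨-, h⟩) <;> exact lt_irrefl _ h

lemma ltK_trans {u v w : String × Int} (h1 : ltK u v) (h2 : ltK v w) : ltK u w := by
  rcases h1 with h1 | ⟨e1, h1⟩ <;> rcases h2 with h2 | ⟨e2, h2⟩
  · exact Or.inl (lt_trans h1 h2)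
  · exact Or.inl (e2 ▸ h1)
  · exact Or.inl (e1 ▸ h2)
  · exact Or.inr ⟨e1.trans e2, lt_trans h1 h2⟩

lemma ltK_asymm {u v : String × Int} (h : ltK u v) : ¬ ltK v u := by
  intro h2; exact ltK_irrefl u (ltK_trans h h2)

lemma ltK_total {u v : String × Int} (h1 : ¬ ltK u v) (h2 : ¬ ltK v u) : u = v := by
  rcases lt_trichotomy u.1 v.1 with h | h | h
  · exact absurd (Or.inl h) h1
  · rcases lt_trichotomy u.2 v.2 with h' | h' | h'
    · exact absurd (Or.inr ⟨h, h'⟩) h1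
    · exact Prod.ext h h'
    · exact absurd (Or.inr ⟨h.symm, h'⟩) h2
  · exact absurd (Or.inl h) h2

-- the boolean 'before' function sorted2 uses
def bf2 {α : Type} (k1 : α → String) (k2 : α → Int) : α → α → Bool :=
  fun a b => decide (k1 a < k1 b) || (!decide (k1 b < k1 a) && decide (k2 a < k2 b))

lemma sorted2_eq_foldl {α : Type} (xs : List α) (k1 : α → String) (k2 : α → Int) :
    PySem.List.sorted2 xs k1 k2 false
      = xs.foldl (fun acc x => PySem.List.insertBy (bf2 k1 k2) x acc) [] := rfl

lemma bf2_iff {α : Type} (k1 : α → String) (k2 : α → Int) (a b : α) :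
    bf2 k1 k2 a b = true ↔ ltK (k1 a, k2 a) (k1 b, k2 b) := by
  simp only [bf2, Bool.or_eq_true, Bool.and_eq_true, Bool.not_eq_true', decide_eq_true_iff,
    decide_eq_false_iff_not, ltK]
  constructor
  · rintro (h | ⟨h1, h2⟩)
    · exact Or.inl h
    · rcases lt_trichotomy (k1 a) (k1 b) with h | h | h
      · exact Or.inl h
      · exact Or.inr ⟨h, h2⟩
      · exact absurd h h1
  · rintro (h | ⟨h1, h2⟩)
    · exact Or.inl h
    · exact Or.inr ⟨by rw [h1]; exact lt_irrefl _, h2⟩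

lemma insertBy_nil {α : Type} (b : α → α → Bool) (x : α) :
    PySem.List.insertBy b x [] = [x] := rfl

lemma insertBy_cons {α : Type} (b : α → α → Bool) (x y : α) (ys : List α) :
    PySem.List.insertBy b x (y :: ys)
      = if b x y then x :: y :: ys else y :: PySem.List.insertBy b x ys := rfl

lemma insertBy_pairwise {α : Type} (k1 : α → String) (k2 : α → Int) (x : α) (l : List α)
    (h : l.Pairwise (fun a b => ¬ ltK (k1 b, k2 b) (k1 a, k2 a))) :
    (PySem.List.insertBy (bf2 k1 k2) x l).Pairwise
      (fun a b => ¬ ltK (k1 b, k2 b) (k1 a, k2 a)) := by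
  induction l with
  | nil => simp [insertBy_nil]
  | cons y ys ih =>
    rw [List.pairwise_cons] at h
    obtain ⟨hy, hys⟩ := h
    rw [insertBy_cons]
    by_cases hb : bf2 k1 k2 x y = true
    · rw [if_pos hb]
      have hxy : ltK (k1 x, k2 x) (k1 y, k2 y) := (bf2_iff k1 k2 x y).mp hb
      refine List.Pairwise.cons ?_ (List.Pairwise.cons hy hys)
      intro z hz
      rcases List.mem_cons.mp hz with rfl | hz2
      · exact ltK_asymm hxy
      · intro hzx
        exact (hy z hz2) (ltK_trans hzx hxy)
    · rw [if_neg hb]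
      refine List.Pairwise.cons ?_ (ih hys)
      intro z hz
      rcases (PySem.List.mem_insertBy _ x z ys).mp hz with rfl | hz2
      · intro hxy
        exact hb ((bf2_iff k1 k2 z y).mpr hxy)
      · exact hy z hz2

lemma foldl_insertBy_pairwise {α : Type} (k1 : α → String) (k2 : α → Int) (l : List α) :
    ∀ acc : List α, acc.Pairwise (fun a b => ¬ ltK (k1 b, k2 b) (k1 a, k2 a)) →
    (l.foldl (fun acc x => PySem.List.insertBy (bf2 k1 k2) x acc) acc).Pairwise
      (fun a b => ¬ ltK (k1 b, k2 b) (k1 a, k2 a)) := by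
  induction l with
  | nil => intro acc h; exact h
  | cons x t ih =>
    intro acc h
    exact ih _ (insertBy_pairwise k1 k2 x acc h)

lemma sorted2_pairwise_le {α : Type} (xs : List α) (k1 : α → String) (k2 : α → Int) :
    (PySem.List.sorted2 xs k1 k2 false).Pairwise
      (fun a b => ¬ ltK (k1 b, k2 b) (k1 a, k2 a)) := by
  rw [sorted2_eq_foldl]
  exact foldl_insertBy_pairwise k1 k2 xs [] (by simp)

-- ---- stability: A's stable sort is the strict decorated sort with the index dropped ----

lemma insertBy_map_snd {α : Type} (ck : α → String) (s : Int) (x : α) (l : List (Int × α))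
    (h : ∀ p ∈ l, p.1 < s) :
    (PySem.List.insertBy (bf2 (fun p : Int × α => ck p.2) (fun p : Int × α => p.1)) (s, x) l).map Prod.snd
      = PySem.List.insertBy (fun a b => decide (ck a < ck b)) x (l.map Prod.snd) := by
  induction l with
  | nil => rfl
  | cons p t ih =>
    have hp : p.1 < s := h p (List.mem_cons_self ..)
    have hd : decide ((s : Int) < p.1) = false := by simp; omega
    rw [List.map_cons, insertBy_cons, insertBy_cons]
    have hb : bf2 (fun p : Int × α => ck p.2) (fun p : Int × α => p.1) (s, x) p
        = decide (ck x < ck p.2) := by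
      simp [bf2, hd]
    rw [hb]
    by_cases hc : ck x < ck p.2
    · simp only [hc, decide_true, if_pos]
      rfl
    · simp only [hc, decide_false, if_neg, Bool.false_eq_true, not_false_iff]
      rw [List.map_cons, ih (fun q hq => h q (List.mem_cons_of_mem _ hq))]

lemma enum_foldl_insertBy {α : Type} (ck : α → String) (xs : List α) :
    ∀ (s : Int) (accD : List (Int × α)), (∀ p ∈ accD, p.1 < s) →
    ((PySem.List.enumerate xs s).foldl
        (fun acc p => PySem.List.insertBy (bf2 (fun p : Int × α => ck p.2) (fun p : Int × α => p.1)) p acc) accD).map Prod.snd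
      = xs.foldl (fun acc x => PySem.List.insertBy (fun a b => decide (ck a < ck b)) x acc) (accD.map Prod.snd) := by
  induction xs with
  | nil => intro s accD h; rfl
  | cons x t ih =>
    intro s accD h
    rw [PySem.List.enumerate_cons, List.foldl_cons, List.foldl_cons]
    rw [← insertBy_map_snd ck s x accD h]
    apply ih (s + 1)
    intro p hp
    rcases (PySem.List.mem_insertBy _ _ p accD).mp hp with rfl | hp
    · omega
    · have := h p hp; omega

lemma sorted_stable {α : Type} (ck : α → String) (xs : List α) :
    PySem.List.sorted xs ck false
      = (PySem.List.sorted2 (PySem.List.enumerate xs 0)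
          (fun p => ck p.2) (fun p => p.1) false).map Prod.snd := by
  rw [PySem.List.sorted_eq_foldl_insertBy, sorted2_eq_foldl]
  exact (enum_foldl_insertBy ck xs 0 [] (by simp)).symm

-- ---- firsts: the first occurrence of each author, in order ----

def firstsF : Nat → List (String × (String × Int)) → List (String × (String × Int))
  | _, [] => []
  | 0, _ :: _ => []
  | n + 1, q :: t => q :: firstsF n (t.filter (fun r => !(r.1 == q.1)))

def firsts (l : List (String × (String × Int))) : List (String × (String × Int)) :=
  firstsF l.length l

lemma firstsF_sublist (n : Nat) : ∀ l, (firstsF n l).Sublist l := by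
  induction n with
  | zero => intro l; cases l <;> simp [firstsF]
  | succ n ih =>
    intro l
    cases l with
    | nil => simp [firstsF]
    | cons q t =>
      rw [firstsF]
      exact List.Sublist.cons₂ q ((ih _).trans List.filter_sublist)

lemma firstsF_congr (n m : Nat) : ∀ l, l.length ≤ n → l.length ≤ m →
    firstsF n l = firstsF m l := by
  induction n generalizing m with
  | zero => intro l h _; cases l with
    | nil => cases m <;> rfl
    | cons q t => simp at h
  | succ n ih =>
    intro l h1 h2
    cases l with
    | nil => cases m <;> rfl
    | cons q t =>
      cases m with
      | zero => simp at h2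
      | succ m =>
        rw [firstsF, firstsF]
        have hle := List.length_filter_le (fun r => !(r.1 == q.1)) t
        simp at h1 h2
        rw [ih m _ (by omega) (by omega)]

lemma firsts_cons (q : String × (String × Int)) (t : List (String × (String × Int))) :
    firsts (q :: t) = q :: firsts (t.filter (fun r => !(r.1 == q.1))) := by
  unfold firsts
  rw [List.length_cons, firstsF]
  have hle := List.length_filter_le (fun r => !(r.1 == q.1)) t
  congr 1
  exact firstsF_congr t.length _ _ hle (le_refl _)

lemma firsts_sublist (l : List (String × (String × Int))) : (firsts l).Sublist l :=
  firstsF_sublist _ l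

lemma firsts_keys_nodup (l : List (String × (String × Int))) :
    ((firsts l).map Prod.fst).Nodup := by
  induction hn : l.length using Nat.strong_induction_on generalizing l with
  | _ n ih =>
  cases l with
  | nil => simp [firsts, firstsF]
  | cons q t =>
    rw [firsts_cons, List.map_cons, List.nodup_cons]
    have hle := List.length_filter_le (fun r => !(r.1 == q.1)) t
    simp only [List.length_cons] at hn
    constructor
    · intro hmem
      obtain ⟨r, hr, hr1⟩ := List.mem_map.mp hmem
      have hrt := (firsts_sublist _).mem hr
      have := (List.mem_filter.mp hrt).2
      simp [hr1] at this
    · exact ih (t.filter (fun r => !(r.1 == q.1))).length (by omega) _ rfl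

lemma mem_firsts (l : List (String × (String × Int)))
    (hp : l.Pairwise (fun p q => ltK p.2 q.2)) (a : String) (v : String × Int) :
    (a, v) ∈ firsts l ↔ ((a, v) ∈ l ∧ ∀ q ∈ l, q.1 = a → ¬ ltK q.2 v) := by
  induction hn : l.length using Nat.strong_induction_on generalizing l with
  | _ n ih =>
  cases l with
  | nil => simp [firsts, firstsF]
  | cons q t =>
    obtain ⟨hq, ht⟩ := List.pairwise_cons.mp hp
    have hfilt : (t.filter (fun r => !(r.1 == q.1))).Pairwise (fun p w => ltK p.2 w.2) :=
      ht.sublist List.filter_sublist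
    have hle := List.length_filter_le (fun r => !(r.1 == q.1)) t
    simp only [List.length_cons] at hn
    have ihf := ih (t.filter (fun r => !(r.1 == q.1))).length (by omega) _ hfilt rfl
    rw [firsts_cons]
    constructor
    · intro h
      rcases List.mem_cons.mp h with heq | hmem
      · have hq1 : q.1 = a := by rw [← heq]
        have hq2 : q.2 = v := by rw [← heq]
        refine ⟨by rw [← heq]; exact List.mem_cons_self .., ?_⟩
        intro r hr hr1
        rcases List.mem_cons.mp hr with rfl | hrt
        · rw [← hq2]; exact ltK_irrefl _
        · rw [← hq2]; exact ltK_asymm (hq r hrt)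
      · obtain ⟨hmemf, hminf⟩ := ihf.mp hmem
        have haq : a ≠ q.1 := by
          have h2 := (List.mem_filter.mp hmemf).2
          intro heq
          simp [← heq] at h2
        refine ⟨List.mem_cons_of_mem _ (List.mem_filter.mp hmemf).1, ?_⟩
        intro r hr hr1
        rcases List.mem_cons.mp hr with rfl | hrt
        · exact absurd hr1.symm haq
        · by_cases hrq : r.1 = q.1
          · -- r is filtered out, but then r.1 = q.1 = a contradicts haq
            exact absurd (hrq ▸ hr1 : q.1 = a) (fun h => haq h.symm)
          · have hrf : r ∈ t.filter (fun r => !(r.1 == q.1)) := by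
              rw [List.mem_filter]
              exact ⟨hrt, by simp [hrq]⟩
            exact hminf r hrf hr1
    · rintro ⟨hmem, hmin⟩
      rcases List.mem_cons.mp hmem with heq | hmemt
      · rw [heq]; exact List.mem_cons_self ..
      · by_cases haq : a = q.1
        · have hlt := hq _ hmemt
          have hqa : ¬ ltK q.2 v := hmin q (List.mem_cons_self ..) haq.symm
          exact absurd hlt hqa
        · apply List.mem_cons_of_mem
          apply ihf.mpr
          refine ⟨?_, ?_⟩
          · rw [List.mem_filter]
            refine ⟨hmemt, ?_⟩
            simp only [Bool.not_eq_eq_eq_not, Bool.not_true, beq_eq_false_iff_ne, ne_eq]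
            exact haq
          · intro r hr hr1
            exact hmin r (List.mem_cons_of_mem _ (List.mem_filter.mp hr).1) hr1

-- dedup of the authors equals the authors of firsts
lemma foldl_add_cons {α : Type} [BEq α] [LawfulBEq α] (m : List α) :
    ∀ (x : α) (acc : List α), x ∉ m →
    m.foldl PySem.Set.add (x :: acc) = x :: m.foldl PySem.Set.add acc := by
  induction m with
  | nil => intro x acc _; rfl
  | cons z t ih =>
    intro x acc hx
    have hzx : z ≠ x := fun h => hx (h ▸ List.mem_cons_self ..)
    have hxt : x ∉ t := fun h => hx (List.mem_cons_of_mem _ h)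
    rw [List.foldl_cons, List.foldl_cons]
    by_cases hz : z ∈ acc
    · rw [PySem.Set.add_of_mem (List.mem_cons_of_mem _ hz), PySem.Set.add_of_mem hz]
      exact ih x acc hxt
    · have hz2 : z ∉ x :: acc := by
        intro h; rcases List.mem_cons.mp h with h | h
        · exact hzx h
        · exact hz h
      rw [PySem.Set.add_of_not_mem hz2, PySem.Set.add_of_not_mem hz, List.cons_append]
      exact ih x (acc ++ [z]) hxt

lemma foldl_add_filter {α : Type} [BEq α] [LawfulBEq α] (m : List α) :
    ∀ (x : α) (acc : List α), x ∈ acc →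
    m.foldl PySem.Set.add acc = (m.filter (fun y => !(y == x))).foldl PySem.Set.add acc := by
  induction m with
  | nil => intro x acc _; rfl
  | cons z t ih =>
    intro x acc hx
    by_cases hzx : z = x
    · subst hzx
      rw [List.filter_cons_of_neg (by simp), List.foldl_cons, PySem.Set.add_of_mem hx]
      exact ih z acc hx
    · rw [List.filter_cons_of_pos (by simp [hzx]), List.foldl_cons, List.foldl_cons]
      exact ih x (PySem.Set.add acc z) ((PySem.Set.mem_add acc z x).mpr (Or.inl hx))

lemma ofList_cons_filter {α : Type} [BEq α] [LawfulBEq α] (x : α) (m : List α) :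
    PySem.Set.ofList (x :: m) = x :: PySem.Set.ofList (m.filter (fun y => !(y == x))) := by
  have h1 : PySem.Set.ofList (x :: m) = m.foldl PySem.Set.add [x] := by
    rw [PySem.Set.ofList_eq_foldl, List.foldl_cons, PySem.Set.add_of_not_mem (List.not_mem_nil)]
    rfl
  have hxf : x ∉ m.filter (fun y => !(y == x)) := by
    intro h
    have := (List.mem_filter.mp h).2
    simp at this
  rw [h1, foldl_add_filter m x [x] (List.mem_cons_self ..),
    foldl_add_cons _ x [] hxf, PySem.Set.ofList_eq_foldl]

lemma dedup_firsts (l : List (String × (String × Int))) :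
    PySem.Set.ofList (l.map Prod.fst) = (firsts l).map Prod.fst := by
  induction hn : l.length using Nat.strong_induction_on generalizing l with
  | _ n ih =>
  cases l with
  | nil => simp [firsts, firstsF, PySem.Set.ofList]
  | cons q t =>
    have hle := List.length_filter_le (fun r => !(r.1 == q.1)) t
    simp only [List.length_cons] at hn
    rw [firsts_cons, List.map_cons, List.map_cons, ofList_cons_filter,
      ← ih (t.filter (fun r => !(r.1 == q.1))).length (by omega) _ rfl]
    congr 1
    rw [List.filter_map]
    rfl

-- ---- A's numbering loop ----

lemma enumerate_append_singleton {α : Type} (u : List α) (a : α) :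
    ∀ s : Int, PySem.List.enumerate (u ++ [a]) s
      = PySem.List.enumerate u s ++ [(s + u.length, a)] := by
  induction u with
  | nil => intro s; simp [PySem.List.enumerate_cons, PySem.List.enumerate_nil]
  | cons x t ih =>
    intro s
    rw [List.cons_append, PySem.List.enumerate_cons, PySem.List.enumerate_cons, ih (s + 1)]
    have h1 : s + 1 + (t.length : Int) = s + ((x :: t).length : Int) := by
      simp only [List.length_cons]; push_cast; ring
    rw [List.cons_append, h1]

lemma enumerate_map {α β : Type} (f : α → β) (l : List α) :
    ∀ s : Int, PySem.List.enumerate (l.map f) s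
      = (PySem.List.enumerate l s).map (fun p => (p.1, f p.2)) := by
  induction l with
  | nil => intro s; rfl
  | cons x t ih =>
    intro s
    rw [List.map_cons, PySem.List.enumerate_cons, PySem.List.enumerate_cons, ih (s + 1)]
    rfl

lemma foldA_items {α : Type} (f : α → String) (l : List α) :
    ∀ (u : List String) (d : PySem.Dict String Int),
    d.items = (PySem.List.enumerate u 1).map (fun p => (p.2, p.1)) →
    ((l.foldl (fun st row =>
        if st.1.contains (f row) then st
        else (st.1.insert (f row) (st.2 + 1), st.2 + 1)) (d, (u.length : Int))).1).items
      = (PySem.List.enumerate (l.foldl (fun u row => PySem.Set.add u (f row)) u) 1).map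
          (fun p => (p.2, p.1)) := by
  induction l with
  | nil => intro u d hd; exact hd
  | cons x t ih =>
    intro u d hd
    have hkeys : d.keys = u := by
      show d.items.map Prod.fst = u
      rw [hd, List.map_map]
      exact PySem.List.map_snd_enumerate u 1
    rw [List.foldl_cons, List.foldl_cons]
    by_cases hmem : f x ∈ u
    · have hc : d.contains (f x) = true := by
        rw [PySem.Dict.contains_iff_mem_keys, hkeys]; exact hmem
      rw [if_pos hc, PySem.Set.add_of_mem hmem]
      exact ih u d hd
    · have hc : ¬ d.contains (f x) = true := by
        rw [PySem.Dict.contains_iff_mem_keys, hkeys]; exact hmem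
      have hc' : d.contains (f x) = false := by simpa using hc
      rw [if_neg hc]
      have hd' : (d.insert (f x) ((u.length : Int) + 1)).items
          = (PySem.List.enumerate (u ++ [f x]) 1).map (fun p => (p.2, p.1)) := by
        rw [PySem.Dict.items_insert_of_not_contains d _ hc', hd,
          enumerate_append_singleton, List.map_append]
        simp [add_comm]
      have hlen : ((u ++ [f x]).length : Int) = (u.length : Int) + 1 := by simp
      have := ih (u ++ [f x]) (d.insert (f x) ((u.length : Int) + 1)) hd'
      rw [hlen] at this
      rw [PySem.Set.add_of_not_mem hmem]
      exact this

-- ---- B's per-author minimum loop ----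

def stepMin (o : Option (String × Int)) (k : String × Int) : Option (String × Int) :=
  match o with
  | none => some k
  | some cur => if ltK k cur then some k else some cur

lemma stepMin_none (k : String × Int) : stepMin none k = some k := rfl

lemma stepMin_some (cur k : String × Int) :
    stepMin (some cur) k = if ltK k cur then some k else some cur := rfl

lemma foldB_get {α : Type} (ck aid : α → String) (l : List (Int × α)) :
    ∀ (d : PySem.Dict String (String × Int)) (a : String),
    ((l.foldl (fun d p =>
        match d.get? (aid p.2) with
        | none => d.insert (aid p.2) (ck p.2, p.1)
        | some cur =>
          if ck p.2 < cur.1 ∨ (ck p.2 = cur.1 ∧ p.1 < cur.2)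
          then d.insert (aid p.2) (ck p.2, p.1) else d) d).get? a)
      = ((l.filter (fun p => aid p.2 == a)).map (fun p => (ck p.2, p.1))).foldl stepMin (d.get? a) := by
  induction l with
  | nil => intro d a; rfl
  | cons p t ih =>
    intro d a
    rw [List.foldl_cons]
    by_cases hpa : aid p.2 = a
    · rw [List.filter_cons_of_pos (by simp [hpa]), List.map_cons, List.foldl_cons]
      rw [ih]
      congr 1
      rw [hpa]
      cases hg : d.get? a with
      | none =>
        rw [stepMin_none]
        show (d.insert a (ck p.2, p.1)).get? a = some (ck p.2, p.1)
        exact PySem.Dict.get?_insert_self d a (ck p.2, p.1)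
      | some cur =>
        rw [stepMin_some]
        show ((if ck p.2 < cur.1 ∨ (ck p.2 = cur.1 ∧ p.1 < cur.2)
            then d.insert a (ck p.2, p.1) else d).get? a)
          = if ltK (ck p.2, p.1) cur then some (ck p.2, p.1) else some cur
        by_cases hlt : ltK (ck p.2, p.1) cur
        · rw [if_pos hlt, if_pos hlt, PySem.Dict.get?_insert_self]
        · rw [if_neg hlt, if_neg hlt, hg]
    · rw [List.filter_cons_of_neg (by simp [hpa]), ih]
      congr 1
      have hne : a ≠ aid p.2 := fun h => hpa h.symm
      cases hg : d.get? (aid p.2) with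
      | none =>
        show (d.insert (aid p.2) (ck p.2, p.1)).get? a = d.get? a
        exact PySem.Dict.get?_insert_of_ne d _ hne
      | some cur =>
        show ((if ck p.2 < cur.1 ∨ (ck p.2 = cur.1 ∧ p.1 < cur.2)
            then d.insert (aid p.2) (ck p.2, p.1) else d).get? a) = d.get? a
        by_cases hlt : ltK (ck p.2, p.1) cur
        · rw [if_pos hlt]
          exact PySem.Dict.get?_insert_of_ne d _ hne
        · rw [if_neg hlt]

lemma foldB_nodup_keys {α : Type} (ck aid : α → String) (l : List (Int × α)) :
    ∀ (d : PySem.Dict String (String × Int)), d.keys.Nodup →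
    ((l.foldl (fun d p =>
        match d.get? (aid p.2) with
        | none => d.insert (aid p.2) (ck p.2, p.1)
        | some cur =>
          if ck p.2 < cur.1 ∨ (ck p.2 = cur.1 ∧ p.1 < cur.2)
          then d.insert (aid p.2) (ck p.2, p.1) else d) d)).keys.Nodup := by
  induction l with
  | nil => intro d hd; exact hd
  | cons p t ih =>
    intro d hd
    rw [List.foldl_cons]
    cases hg : d.get? (aid p.2) with
    | none => exact ih _ (PySem.Dict.nodup_keys_insert _ _ _ hd)
    | some cur =>
      by_cases hlt : ltK (ck p.2, p.1) cur
      · exact ih (if ck p.2 < cur.1 ∨ (ck p.2 = cur.1 ∧ p.1 < cur.2)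
            then d.insert (aid p.2) (ck p.2, p.1) else d)
          (by rw [if_pos hlt]; exact PySem.Dict.nodup_keys_insert _ _ _ hd)
      · exact ih (if ck p.2 < cur.1 ∨ (ck p.2 = cur.1 ∧ p.1 < cur.2)
            then d.insert (aid p.2) (ck p.2, p.1) else d)
          (by rw [if_neg hlt]; exact hd)

lemma stepMin_foldl_min (ks : List (String × Int)) :
    ∀ c : String × Int, ∃ v, ks.foldl stepMin (some c) = some v ∧ v ∈ c :: ks ∧
      ∀ w ∈ c :: ks, ¬ ltK w v := by
  induction ks with
  | nil =>
    intro c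
    refine ⟨c, rfl, List.mem_cons_self .., ?_⟩
    intro w hw
    rcases List.mem_cons.mp hw with rfl | hw
    · exact ltK_irrefl _
    · exact absurd hw (List.not_mem_nil)
  | cons k t ih =>
    intro c
    rw [List.foldl_cons, stepMin_some]
    by_cases hlt : ltK k c
    · rw [if_pos hlt]
      obtain ⟨v, hv, hvm, hmin⟩ := ih k
      refine ⟨v, hv, ?_, ?_⟩
      · rcases List.mem_cons.mp hvm with heq | hvm2
        · exact heq ▸ List.mem_cons_of_mem _ (List.mem_cons_self ..)
        · exact List.mem_cons_of_mem _ (List.mem_cons_of_mem _ hvm2)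
      · intro w hw
        rcases List.mem_cons.mp hw with heq | hw2
        · intro hcv
          exact hmin k (List.mem_cons_self ..) (ltK_trans hlt (heq ▸ hcv))
        · exact hmin w hw2
    · rw [if_neg hlt]
      obtain ⟨v, hv, hvm, hmin⟩ := ih c
      refine ⟨v, hv, ?_, ?_⟩
      · rcases List.mem_cons.mp hvm with heq | hvm2
        · exact heq ▸ List.mem_cons_self ..
        · exact List.mem_cons_of_mem _ (List.mem_cons_of_mem _ hvm2)
      · intro w hw
        rcases List.mem_cons.mp hw with heq | hw2
        · exact heq ▸ hmin c (List.mem_cons_self ..)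
        · rcases List.mem_cons.mp hw2 with heq2 | hw3
          · intro hkv
            have hcv : ¬ ltK c v := hmin c (List.mem_cons_self ..)
            have hwv : ltK k v := heq2 ▸ hkv
            by_cases hck : ltK c k
            · exact hcv (ltK_trans hck hwv)
            · have h3 : ltK c v := by rw [ltK_total hck hlt]; exact hwv
              exact hcv h3
          · exact hmin w (List.mem_cons_of_mem _ hw3)

lemma stepMin_foldl_none_iff (ks : List (String × Int)) (v : String × Int) :
    ks.foldl stepMin none = some v ↔ (v ∈ ks ∧ ∀ w ∈ ks, ¬ ltK w v) := by
  cases ks with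
  | nil => simp
  | cons k t =>
    rw [List.foldl_cons, stepMin_none]
    obtain ⟨v', hv', hm', hmin'⟩ := stepMin_foldl_min t k
    rw [hv']
    constructor
    · rintro h
      have : v = v' := (Option.some.inj h).symm
      subst this
      exact ⟨hm', hmin'⟩
    · rintro ⟨hmem, hmin⟩
      have h1 : ¬ ltK v v' := hmin' v hmem
      have h2 : ¬ ltK v' v := hmin v' hm'
      rw [ltK_total h2 h1]

-- ---- the master equivalence, generic in the two field accessors ----

theorem master {α : Type} (ck aid : α → String) (rows : List α) :
    ((PySem.List.sorted rows ck false).foldl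
      (fun st row =>
        if st.1.contains (aid row) then st
        else (st.1.insert (aid row) (st.2 + 1), st.2 + 1))
      ((PySem.Dict.empty : PySem.Dict String Int), (0 : Int))).1.items
    =
    ((PySem.List.enumerate
        (PySem.List.sorted2
          ((PySem.List.enumerate rows 0).foldl
            (fun d p =>
              match d.get? (aid p.2) with
              | none => d.insert (aid p.2) (ck p.2, p.1)
              | some cur =>
                if ck p.2 < cur.1 ∨ (ck p.2 = cur.1 ∧ p.1 < cur.2)
                then d.insert (aid p.2) (ck p.2, p.1) else d)
            (PySem.Dict.empty : PySem.Dict String (String × Int))).items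
          (fun kv => kv.2.1) (fun kv => kv.2.2) false)
        1).foldl
      (fun d q => d.insert q.2.1 q.1) (PySem.Dict.empty : PySem.Dict String Int)).items := by
  -- names
  set E := PySem.List.enumerate rows 0 with hEdef
  set L := PySem.List.sorted2 E (fun p => ck p.2) (fun p : Int × α => p.1) false with hLdef
  set entry : (Int × α) → String × (String × Int) := fun p => (aid p.2, (ck p.2, p.1)) with hentry
  set eL := L.map entry with heL
  set best := E.foldl
      (fun d p =>
        match d.get? (aid p.2) with
        | none => d.insert (aid p.2) (ck p.2, p.1)
        | some cur =>
          if ck p.2 < cur.1 ∨ (ck p.2 = cur.1 ∧ p.1 < cur.2)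
          then d.insert (aid p.2) (ck p.2, p.1) else d)
      (PySem.Dict.empty : PySem.Dict String (String × Int)) with hbest
  set S := PySem.List.sorted2 best.items (fun kv => kv.2.1) (fun kv => kv.2.2) false with hS
  -- ==== A side: items = numbered dedup of authors of the (stably) sorted rows ====
  have hA1 : ((PySem.List.sorted rows ck false).foldl
      (fun st row =>
        if st.1.contains (aid row) then st
        else (st.1.insert (aid row) (st.2 + 1), st.2 + 1))
      ((PySem.Dict.empty : PySem.Dict String Int), (0 : Int))).1.items
      = (PySem.List.enumerate (PySem.Set.ofList (eL.map Prod.fst)) 1).map (fun p => (p.2, p.1)) := by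
    rw [sorted_stable ck rows, ← hEdef, ← hLdef]
    have hA := foldA_items aid (L.map Prod.snd) [] PySem.Dict.empty rfl
    simp only [List.length_nil, Nat.cast_zero] at hA
    rw [hA, List.foldl_map (f := Prod.snd), ← List.foldl_map (f := fun p : Int × α => aid p.2)]
    rw [← PySem.Set.ofList_eq_foldl, heL, List.map_map]
    rfl
  -- ==== key order facts ====
  have hEfst : (E.map Prod.fst).Nodup := by
    rw [hEdef]
    show (List.map (fun x : Int × α => x.1) (PySem.List.enumerate rows 0)).Nodup
    rw [PySem.List.map_fst_enumerate rows 0]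
    exact PySem.List.nodup_pyRange_one _ _
  have hpermL : L.Perm E := PySem.List.sorted2_perm E _ _ false
  have hLfst : (L.map Prod.fst).Nodup := ((hpermL.map Prod.fst).nodup_iff).mpr hEfst
  have hLle : L.Pairwise (fun p q => ¬ ltK (ck q.2, q.1) (ck p.2, p.1)) :=
    sorted2_pairwise_le E _ _
  have hLne : L.Pairwise (fun p q => p.1 ≠ q.1) := List.pairwise_map.mp hLfst
  have hLstrict : L.Pairwise (fun p q => ltK (ck p.2, p.1) (ck q.2, q.1)) := by
    refine (hLle.and hLne).imp ?_
    rintro p q ⟨h1, h2⟩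
    by_cases h3 : ltK (ck p.2, p.1) (ck q.2, q.1)
    · exact h3
    · exact absurd (congrArg Prod.snd (ltK_total h3 h1)) h2
  have heLstrict : eL.Pairwise (fun x y => ltK x.2 y.2) := by
    rw [heL]
    exact List.pairwise_map.mpr hLstrict
  -- ==== best: nodup keys and min characterisation ====
  have hbestkeys : best.keys.Nodup := by
    rw [hbest]
    exact foldB_nodup_keys ck aid E PySem.Dict.empty PySem.Dict.nodup_keys_empty
  have hbestget : ∀ a v, best.get? a = some v ↔
      (v ∈ (E.filter (fun p => aid p.2 == a)).map (fun p => (ck p.2, p.1)) ∧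
       ∀ w ∈ (E.filter (fun p => aid p.2 == a)).map (fun p => (ck p.2, p.1)), ¬ ltK w v) := by
    intro a v
    rw [hbest, foldB_get ck aid E PySem.Dict.empty a, PySem.Dict.get?_empty,
      stepMin_foldl_none_iff]
  -- ==== membership: best.items = firsts eL as sets ====
  have hmemE : ∀ (M : List (Int × α)) (a : String) (v : String × Int),
      (a, v) ∈ M.map entry ↔ v ∈ (M.filter (fun p => aid p.2 == a)).map (fun p => (ck p.2, p.1)) := by
    intro M a v
    constructor
    · intro h
      obtain ⟨p, hp, h2⟩ := List.mem_map.mp h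
      have h1 : aid p.2 = a := congrArg Prod.fst h2
      have h3 : (ck p.2, p.1) = v := congrArg Prod.snd h2
      exact List.mem_map.mpr ⟨p, List.mem_filter.mpr ⟨hp, beq_iff_eq.mpr h1⟩, h3⟩
    · intro h
      obtain ⟨p, hp, h2⟩ := List.mem_map.mp h
      have hpf := List.mem_filter.mp hp
      refine List.mem_map.mpr ⟨p, hpf.1, ?_⟩
      rw [hentry]
      exact Prod.ext (beq_iff_eq.mp hpf.2) h2
  have hallE : ∀ (M : List (Int × α)) (a : String) (v : String × Int),
      (∀ q ∈ M.map entry, q.1 = a → ¬ ltK q.2 v) ↔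
      (∀ w ∈ (M.filter (fun p => aid p.2 == a)).map (fun p => (ck p.2, p.1)), ¬ ltK w v) := by
    intro M a v
    constructor
    · intro h w hw
      obtain ⟨p, hp, h2⟩ := List.mem_map.mp hw
      have hpf := List.mem_filter.mp hp
      subst h2
      exact h (entry p) (List.mem_map_of_mem hpf.1) (beq_iff_eq.mp hpf.2)
    · intro h q hq h1
      obtain ⟨p, hp, h2⟩ := List.mem_map.mp hq
      subst h2
      exact h (ck p.2, p.1) (List.mem_map.mpr ⟨p, List.mem_filter.mpr ⟨hp, beq_iff_eq.mpr h1⟩, rfl⟩)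
  have hksperm : ∀ a : String,
      ((L.filter (fun p => aid p.2 == a)).map (fun p => (ck p.2, p.1))).Perm
      ((E.filter (fun p => aid p.2 == a)).map (fun p => (ck p.2, p.1))) :=
    fun a => (hpermL.filter _).map _
  have hmemiff : ∀ a v, (a, v) ∈ best.items ↔ (a, v) ∈ firsts eL := by
    intro a v
    rw [← PySem.Dict.get?_eq_some_iff_mem_items best a v hbestkeys,
      mem_firsts eL heLstrict a v, hbestget a v, heL, hmemE L a v, hallE L a v]
    constructor
    · rintro ⟨h1, h2⟩
      exact ⟨(hksperm a).mem_iff.mpr h1, fun w hw => h2 w ((hksperm a).mem_iff.mp hw)⟩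
    · rintro ⟨h1, h2⟩
      exact ⟨(hksperm a).mem_iff.mp h1, fun w hw => h2 w ((hksperm a).mem_iff.mpr hw)⟩
  have hbestnodup : best.items.Nodup := List.Nodup.of_map _ hbestkeys
  have hXnodup : (firsts eL).Nodup := List.Nodup.of_map _ (firsts_keys_nodup eL)
  have hpermBX : best.items.Perm (firsts eL) := by
    rw [List.perm_ext_iff_of_nodup hbestnodup hXnodup]
    rintro ⟨a, v⟩
    exact hmemiff a v
  -- ==== values of best are pairwise distinct ====
  have hvmem : ∀ x : String × (String × Int), x ∈ best.items →
      ∃ p ∈ E, aid p.2 = x.1 ∧ (ck p.2, p.1) = x.2 := by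
    rintro ⟨a, v⟩ hx
    have := (hbestget a v).mp ((PySem.Dict.get?_eq_some_iff_mem_items best a v hbestkeys).mpr hx)
    obtain ⟨p, hp, hv⟩ := List.mem_map.mp this.1
    exact ⟨p, (List.mem_filter.mp hp).1, beq_iff_eq.mp (List.mem_filter.mp hp).2, hv⟩
  have hvalne : best.items.Pairwise (fun x y => x.2 ≠ y.2) := by
    have hkeyne : best.items.Pairwise (fun x y => x.1 ≠ y.1) := List.pairwise_map.mp hbestkeys
    refine hkeyne.imp_of_mem ?_
    intro x y hx hy hne heq
    obtain ⟨p, hp, hpa, hpv⟩ := hvmem x hx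
    obtain ⟨q, hq, hqa, hqv⟩ := hvmem y hy
    have hidx : p.1 = q.1 := by
      have : (ck p.2, p.1).2 = (ck q.2, q.1).2 := by rw [hpv, hqv, heq]
      exact this
    have hpq : p = q := List.inj_on_of_nodup_map hEfst hp hq hidx
    exact hne (hpa ▸ hqa ▸ hpq ▸ rfl)
  -- ==== S is strictly sorted and a permutation of firsts eL ====
  have hSperm : S.Perm best.items := PySem.List.sorted2_perm best.items _ _ false
  have hSvalnodup : (S.map (fun x => x.2)).Nodup :=
    ((hSperm.map _).nodup_iff).mpr (List.pairwise_map.mpr hvalne)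
  have hSle : S.Pairwise (fun x y => ¬ ltK (y.2.1, y.2.2) (x.2.1, x.2.2)) :=
    sorted2_pairwise_le best.items _ _
  have hSstrict : S.Pairwise (fun x y => ltK x.2 y.2) := by
    have hSne : S.Pairwise (fun x y => x.2 ≠ y.2) := List.pairwise_map.mp hSvalnodup
    refine (hSle.and hSne).imp ?_
    rintro x y ⟨h1, h2⟩
    by_cases h3 : ltK x.2 y.2
    · exact h3
    · rw [Prod.mk.eta, Prod.mk.eta] at h1
      exact absurd (ltK_total h3 h1) h2
  have hXstrict : (firsts eL).Pairwise (fun x y => ltK x.2 y.2) :=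
    heLstrict.sublist (firsts_sublist eL)
  have hXS : firsts eL = S := by
    have hanti : ∀ (a b : String × (String × Int)), a ∈ firsts eL → b ∈ S →
        ltK a.2 b.2 → ltK b.2 a.2 → a = b :=
      fun a b _ _ h1 h2 => absurd h1 (ltK_asymm h2)
    exact List.Perm.eq_of_pairwise hanti hXstrict hSstrict (hpermBX.symm.trans hSperm.symm)
  -- ==== B side: the final numbering loop ====
  have hmapS : (PySem.List.enumerate S 1).map (fun q => q.2.1) = S.map Prod.fst := by
    have h1 : (PySem.List.enumerate S 1).map (fun q => q.2.1)
        = ((PySem.List.enumerate S 1).map (fun q => q.2)).map (fun x => x.1) := by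
      rw [List.map_map]; rfl
    rw [h1, PySem.List.map_snd_enumerate]
  have hSfstnodup : (S.map Prod.fst).Nodup := ((hSperm.map Prod.fst).nodup_iff).mpr hbestkeys
  have hB : ((PySem.List.enumerate S 1).foldl
      (fun d q => d.insert q.2.1 q.1) (PySem.Dict.empty : PySem.Dict String Int)).items
      = (PySem.List.enumerate S 1).map (fun q => (q.2.1, q.1)) := by
    rw [PySem.Dict.items_foldl_insert_fresh (PySem.List.enumerate S 1)
      (fun q => q.2.1) (fun q => q.1) PySem.Dict.empty
      (fun a _ => by simp [PySem.Dict.contains, PySem.Dict.empty])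
      (by rw [hmapS]; exact hSfstnodup)]
    rfl
  -- ==== conclude ====
  rw [hA1, hB, dedup_firsts eL, hXS, enumerate_map, List.map_map]
  rfl
-- ===== VERDICT (by name: the statement is the Claim_ definition above) =====
theorem build_comment_author_aliases_spec : Claim_equal_build_comment_author_aliases := by
  intro rows _ _
  unfold Spec_build_comment_author_aliases build_comment_author_aliases build_comment_author_aliases_alt
  exact master (fun r => pvGetKey r "created_at") (fun r => pvGetKey r "author_id") rows
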